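-- pv_equiv track=rewrite | github.com/Karimsultan/genet | genet/utils/simplification.py | update_link_ids
-- ===== SOURCE A (Python) =====
-- def update_link_ids(old_route, link_mapping):
--     new_route = []
--     for link in old_route:
--         updated_route_link = link
--         try:
--             updated_route_link = link_mapping[link]
--         except KeyError:
--             pass
--         if not new_route:
--             new_route = [updated_route_link]
--         elif new_route[-1] != updated_route_link:
--             new_route.append(updated_route_link)
--     return new_route
-- ===== SOURCE B (Python) =====
-- def update_link_ids(old_route, link_mapping):
--     mapped = [link_mapping.get(link, link) for link in old_route]
--     out = []
--     i = 0
--     n = len(mapped)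
--     while i < n:
--         # emit the head of the current run, then skip past the whole run
--         v = mapped[i]
--         out.append(v)
--         i += 1
--         while i < n and mapped[i] == v:
--             i += 1
--     return out
-- ===== Notes on version B (the rewrite author's own statement) =====
-- stated objective: alternative
-- what changed: Replaces A's single fused loop with last-element bookkeeping by a map pass followed by a run-skipping collapse: an outer loop per run of equal mapped ids that emits the run head and an inner loop that skips past the rest of the run, never inspecting the output list.
import Mathlib
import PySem

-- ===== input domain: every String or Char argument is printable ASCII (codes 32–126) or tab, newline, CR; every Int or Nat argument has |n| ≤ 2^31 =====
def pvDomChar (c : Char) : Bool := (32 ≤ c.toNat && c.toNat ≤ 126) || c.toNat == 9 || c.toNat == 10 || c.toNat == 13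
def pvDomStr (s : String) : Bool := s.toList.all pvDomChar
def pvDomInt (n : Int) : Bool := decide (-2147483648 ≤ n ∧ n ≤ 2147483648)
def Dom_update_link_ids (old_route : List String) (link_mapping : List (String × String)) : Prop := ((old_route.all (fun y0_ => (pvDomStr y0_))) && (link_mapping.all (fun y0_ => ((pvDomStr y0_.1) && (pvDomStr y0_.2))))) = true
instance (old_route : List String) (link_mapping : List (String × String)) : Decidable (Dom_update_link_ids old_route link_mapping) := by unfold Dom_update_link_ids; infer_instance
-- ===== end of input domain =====

-- B replaces A's fused stateful loop (last-element bookkeeping) by a map pass plus a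
-- run-skipping collapse (outer loop per run: emit head, inner loop skips the run); alternative structure.


-- ===== PORT A =====
-- literal transliteration of A's single loop: try link_mapping[link] (KeyError → keep link),
-- then 'if not new_route …' / 'elif new_route[-1] != u: append'
def update_link_ids (old_route : List String) (link_mapping : List (String × String)) : List String :=
  old_route.foldl (fun new_route link =>
    let updated_route_link := ((PySem.Dict.mk link_mapping).get? link).getD link
    if new_route = [] then [updated_route_link]
    else if PySem.List.pyGet? new_route (-1) ≠ some updated_route_link then
      new_route ++ [updated_route_link]
    else new_route) []

-- ===== PORT B =====
-- run-skipping collapse, one recursive step per run of B's outer loop: emit the run head,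
-- drop the whole run (the Python inner 'while … mapped[i] == v: i += 1' is exactly dropWhile), continue
def pvCollapse : List String → List String
  | [] => []
  | v :: rest => v :: pvCollapse (rest.dropWhile (· == v))
termination_by l => l.length
decreasing_by
  exact Nat.lt_succ_of_le (List.length_dropWhile_le _ _)

def update_link_ids_alt (old_route : List String) (link_mapping : List (String × String)) : List String :=
  pvCollapse (old_route.map (fun link => ((PySem.Dict.mk link_mapping).get? link).getD link))

-- ===== PRECONDITION & SPEC =====
def Spec_update_link_ids (old_route : List String) (link_mapping : List (String × String)) (out : List String) : Prop := out = update_link_ids_alt old_route link_mapping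
instance (old_route : List String) (link_mapping : List (String × String)) (out : List String) : Decidable (Spec_update_link_ids old_route link_mapping out) := by unfold Spec_update_link_ids; infer_instance

-- ===== CLAIM (what is proved, stated in full; the proofs are below) =====
def Claim_equal_update_link_ids : Prop := ∀ (old_route : List String) (link_mapping : List (String × String)), Dom_update_link_ids old_route link_mapping → Spec_update_link_ids old_route link_mapping (update_link_ids old_route link_mapping)

-- ===== LEMMAS AND PROOFS =====

@[simp] theorem pvCollapse_nil : pvCollapse [] = [] := by unfold pvCollapse; rfl

@[simp] theorem pvCollapse_cons (v : String) (rest : List String) :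
    pvCollapse (v :: rest) = v :: pvCollapse (rest.dropWhile (· == v)) := by
  rw [pvCollapse]

-- A's loop step, expressed on the already-mapped element
def pvStep (new_route : List String) (u : String) : List String :=
  if new_route = [] then [u]
  else if PySem.List.pyGet? new_route (-1) ≠ some u then new_route ++ [u]
  else new_route

-- invariant: folding A's step from pre ++ [a] equals pre ++ a-run-collapse of a's continuation
theorem pvFold_inv (l : List String) (a : String) (pre : List String) :
    List.foldl pvStep (pre ++ [a]) l = pre ++ a :: pvCollapse (l.dropWhile (· == a)) := by
  induction l generalizing a pre with
  | nil => simp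
  | cons u l ih =>
    rw [List.foldl_cons]
    by_cases h : u = a
    · subst h
      have hs : pvStep (pre ++ [u]) u = pre ++ [u] := by
        simp [pvStep, PySem.List.pyGet?_neg_one]
      rw [hs, ih]
      simp
    · have hs : pvStep (pre ++ [a]) u = (pre ++ [a]) ++ [u] := by
        simp [pvStep, PySem.List.pyGet?_neg_one]
        exact fun e => h e.symm
      rw [hs, ih u (pre ++ [a])]
      have hba : (u == a) = false := by simp [h]
      simp [List.dropWhile, hba]

theorem pvFold_eq_collapse (l : List String) :
    List.foldl pvStep [] l = pvCollapse l := by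
  cases l with
  | nil => simp
  | cons u l =>
    have h0 : pvStep [] u = [u] := by simp [pvStep]
    rw [List.foldl_cons, h0, pvCollapse_cons]
    simpa using pvFold_inv l u []

-- ===== VERDICT (by name: the statement is the Claim_ definition above) =====
theorem update_link_ids_spec : Claim_equal_update_link_ids := by
  intro old_route link_mapping _
  unfold Spec_update_link_ids update_link_ids update_link_ids_alt
  rw [← pvFold_eq_collapse, List.foldl_map]
  rfl
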